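-- pv_equiv track=rewrite | github.com/kuritan/codility-practice | Lesson1-BinaryGap.py | solution
-- ===== SOURCE A (Python) =====
-- def solution(N):
--     binary_num = format(N, 'b')
--
--     count_zero = 0
--     max_zero = 0
--     for i in binary_num:
--         if i == "1":
--             if (count_zero > max_zero):
--                 max_zero = count_zero
--             count_zero = 0
--         else:
--             count_zero += 1
--     return max_zero
-- ===== SOURCE B (Python) =====
-- def solution(N):
--     binary = format(N, 'b')
--     return max((len(s) for s in binary.split('1')[:-1]), default=0)
-- ===== Notes on version B (the rewrite author's own statement) =====
-- stated objective: simpler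
-- what changed: Replaces the two-counter running-max loop by splitting the binary string on '1', dropping the trailing segment, and taking the max segment length (default 0).
import Mathlib
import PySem

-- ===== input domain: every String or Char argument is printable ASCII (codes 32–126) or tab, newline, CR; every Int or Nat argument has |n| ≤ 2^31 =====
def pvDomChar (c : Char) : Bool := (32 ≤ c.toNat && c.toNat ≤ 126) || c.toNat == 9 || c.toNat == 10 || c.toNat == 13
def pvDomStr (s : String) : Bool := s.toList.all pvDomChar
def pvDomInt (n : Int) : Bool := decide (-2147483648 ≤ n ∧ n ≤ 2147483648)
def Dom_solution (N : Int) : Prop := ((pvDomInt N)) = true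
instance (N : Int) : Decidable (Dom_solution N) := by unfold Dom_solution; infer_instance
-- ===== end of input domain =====

-- B replaces A's two-counter running-max loop by split-on-'1' / drop trailing segment / max length: simpler, same cost.

-- ===== PORT A =====
-- the loop body of A (count_zero, max_zero updated per character)
def stepA (st : Int × Int) (i : Char) : Int × Int :=
  if i = '1' then (0, if st.1 > st.2 then st.1 else st.2)
  else (st.1 + 1, st.2)

def solution (N : Int) : Int :=
  let binary_num := PySem.Int.toBinChars N   -- format(N, 'b')
  let r := binary_num.foldl stepA (0, 0)
  r.2

-- ===== PORT B =====
-- binary.split('1') with the nonempty literal sep '1' is PySem.Chars.splitOn; [:-1] is slice … (some (-1))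
def solution_alt (N : Int) : Int :=
  let binary := PySem.Int.toBinChars N       -- format(N, 'b')
  let gaps := PySem.List.slice (PySem.Chars.splitOn binary ['1']) none (some (-1))
  PySem.List.maxD (gaps.map (fun s => PySem.List.len s)) (fun x => x) 0

-- ===== PRECONDITION & SPEC =====
def Spec_solution (N : Int) (out : Int) : Prop := out = solution_alt N
instance (N : Int) (out : Int) : Decidable (Spec_solution N out) := by unfold Spec_solution; infer_instance

-- ===== CLAIM (what is proved, stated in full; the proofs are below) =====
def Claim_equal_solution : Prop := ∀ (N : Int), Dom_solution N → Spec_solution N (solution N)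

-- ===== LEMMAS AND PROOFS =====

-- structural split on '1' (no fuel, no accumulator); proved equal to PySem.Chars.splitOn · ['1']
def mySplit : List Char → List (List Char)
  | [] => [[]]
  | x :: rest =>
    if x = '1' then [] :: mySplit rest
    else
      match mySplit rest with
      | p :: ps => (x :: p) :: ps
      | [] => [[x]]

lemma mySplit_ne_nil (cs : List Char) : mySplit cs ≠ [] := by
  cases cs with
  | nil => simp [mySplit]
  | cons x rest =>
    simp only [mySplit]
    split
    · simp
    · split <;> simp_all

-- prepend p onto the head segment
def ph (p : List Char) (qs : List (List Char)) : List (List Char) :=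
  match qs with
  | q :: rest => (p ++ q) :: rest
  | [] => [p]

lemma splitOn_go_spec : ∀ (fuel : Nat) (l cur : List Char) (acc : List (List Char)),
    l.length < fuel →
    PySem.Chars.splitOn.go ['1'] fuel l cur acc = acc.reverse ++ ph cur.reverse (mySplit l) := by
  intro fuel
  induction fuel with
  | zero => intro l cur acc h; omega
  | succ n ih =>
    intro l cur acc h
    cases l with
    | nil =>
      simp [PySem.Chars.splitOn.go, mySplit, ph]
    | cons c rest =>
      by_cases hc : c = '1'
      · subst hc
        have hpre : List.isPrefixOf ['1'] ('1' :: rest) = true := by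
          simp [List.isPrefixOf]
        rw [PySem.Chars.splitOn.go]
        simp only [hpre, if_pos, List.length_cons, List.length_nil, List.drop_succ_cons, List.drop_zero]
        rw [ih rest [] (cur.reverse :: acc) (by simpa using Nat.lt_of_succ_lt_succ h)]
        cases hms : mySplit rest with
        | nil => exact absurd hms (mySplit_ne_nil rest)
        | cons q qs =>
          simp [mySplit, ph, hms]
      · have hpre : List.isPrefixOf ['1'] (c :: rest) = false := by
          simp [List.isPrefixOf]
          exact fun hh => (hc hh.symm).elim
        rw [PySem.Chars.splitOn.go]
        simp only [hpre, Bool.false_eq_true, if_neg, not_false_iff]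
        rw [ih rest (c :: cur) acc (by simpa using Nat.lt_of_succ_lt_succ h)]
        cases hms : mySplit rest with
        | nil => exact absurd hms (mySplit_ne_nil rest)
        | cons q qs =>
          simp [mySplit, ph, hms, hc]

lemma splitOn_eq_mySplit (cs : List Char) :
    PySem.Chars.splitOn cs ['1'] = mySplit cs := by
  unfold PySem.Chars.splitOn
  rw [splitOn_go_spec (cs.length + 1) cs [] [] (by omega)]
  cases hms : mySplit cs with
  | nil => exact absurd hms (mySplit_ne_nil cs)
  | cons q qs => simp [ph]

-- the gap lengths A's loop sees, with the running count c folded into the first segment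
def adj (cs : List Char) (c : Int) : List Int :=
  match mySplit cs with
  | [] => []
  | p :: ps =>
    if ps = [] then []
    else (c + p.length) :: (ps.dropLast.map (fun q => (q.length : Int)))

lemma fold_spec : ∀ (cs : List Char) (c m : Int),
    (cs.foldl stepA (c, m)).2 = (adj cs c).foldl max m := by
  intro cs
  induction cs with
  | nil => intro c m; simp [adj, mySplit]
  | cons x rest ih =>
    intro c m
    by_cases hx : x = '1'
    · subst hx
      have h1 : stepA (c, m) '1' = (0, max m c) := by
        unfold stepA
        split_ifs with h1 h2 <;> simp_all <;> omega
      rw [List.foldl_cons, h1, ih]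
      have hadj : adj ('1' :: rest) c = c :: ((mySplit rest).dropLast.map (fun q => (q.length : Int))) := by
        simp only [adj, mySplit]
        cases hms : mySplit rest with
        | nil => exact absurd hms (mySplit_ne_nil rest)
        | cons q qs => simp
      rw [hadj, List.foldl_cons]
      -- adj rest 0 = (mySplit rest).dropLast.map len
      have hzero : adj rest 0 = (mySplit rest).dropLast.map (fun q => (q.length : Int)) := by
        simp only [adj]
        cases hms : mySplit rest with
        | nil => exact absurd hms (mySplit_ne_nil rest)
        | cons q qs =>
          cases qs with
          | nil => simp
          | cons q' qs' => simp
      rw [hzero]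
    · have h1 : stepA (c, m) x = (c + 1, m) := by simp [stepA, hx]
      rw [List.foldl_cons, h1, ih]
      have hadj : adj (x :: rest) c = adj rest (c + 1) := by
        simp only [adj, mySplit, if_neg hx]
        cases hms : mySplit rest with
        | nil => exact absurd hms (mySplit_ne_nil rest)
        | cons q qs =>
          cases qs with
          | nil => simp
          | cons a b =>
            simp only [List.length_cons, if_neg (by simp : ¬(a :: b = []))]
            congr 1
            push_cast
            ring
      rw [hadj]

-- ===== VERDICT (by name: the statement is the Claim_ definition above) =====
theorem solution_spec : Claim_equal_solution := by
  unfold Claim_equal_solution Spec_solution solution solution_alt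
  intro N _
  simp only []
  rw [PySem.List.slice_to_neg_one, splitOn_eq_mySplit, fold_spec]
  set cs := PySem.Int.toBinChars N with hcs
  have hzero : adj cs 0 = (mySplit cs).dropLast.map (fun q => (q.length : Int)) := by
    simp only [adj]
    cases hms : mySplit cs with
    | nil => exact absurd hms (mySplit_ne_nil cs)
    | cons q qs =>
      cases qs with
      | nil => simp
      | cons q' qs' => simp
  rw [hzero]
  have hlen : ((mySplit cs).dropLast.map (fun s => PySem.List.len s))
      = (mySplit cs).dropLast.map (fun q => (q.length : Int)) := by
    simp [PySem.List.len_eq]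
  rw [hlen]
  cases hL : (mySplit cs).dropLast.map (fun q => (q.length : Int)) with
  | nil => simp [PySem.List.maxD, PySem.List.max?]
  | cons x t =>
    have hx : 0 ≤ x := by
      have : x ∈ (mySplit cs).dropLast.map (fun q => (q.length : Int)) := by
        rw [hL]; exact List.mem_cons_self
      obtain ⟨q, _, hq⟩ := List.mem_map.mp this
      simp [← hq]
    rw [List.foldl_cons, max_eq_right hx]
    simp [PySem.List.maxD, PySem.List.max?_id_cons]
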